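-- pv_equiv track=rewrite | github.com/RHEcosystemAppEng/sast-ai-workflow | src/sast_agent_workflow/research_agent/scripts/run_train_dataset_batch.py | parse_nvr
-- ===== SOURCE A (Python) =====
-- def parse_nvr(nvr):
--     """
--     Parse Package NVR into name and version.
--     Format: name-version-release or name-version
--
--     The version part starts at the first numeric component after a dash.
--
--     Example:
--         at-3.2.5 -> name="at", version="3.2.5"
--         tpm2-tss-4.0.1-7.el10 -> name="tpm2-tss", version="4.0.1-7.el10"
--         mtools-4.0.43 -> name="mtools", version="4.0.43"
--     """
--     parts = nvr.split("-")
--     if len(parts) < 2: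
--         raise ValueError(f"Invalid NVR format: {nvr}")
--
--     # Find the first part that starts with a digit (this is where version begins)
--     version_start_idx = None
--     for i, part in enumerate(parts):
--         if part and part[0].isdigit():
--             version_start_idx = i
--             break
--
--     if version_start_idx is None:
--         raise ValueError(f"Could not find version in NVR: {nvr}")
--
--     # Everything before the version is the name
--     name = "-".join(parts[:version_start_idx])
--     # Everything from the version onwards is the version
--     version = "-".join(parts[version_start_idx:])
--
--     return name, version
-- ===== SOURCE B (Python) =====
-- def parse_nvr(nvr):
--     """
--     Parse Package NVR into name and version.
--
--     Single left-to-right scan over the original string: the version starts at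
--     the first character that is a digit and begins a dash-separated component
--     (position 0 or right after a '-'); slice nvr there instead of splitting
--     and re-joining.
--     """
--     if "-" not in nvr:
--         raise ValueError(f"Invalid NVR format: {nvr}")
--
--     for i, ch in enumerate(nvr):
--         if ch.isdigit() and (i == 0 or nvr[i - 1] == "-"):
--             return (nvr[:i - 1] if i else "", nvr[i:])
--
--     raise ValueError(f"Could not find version in NVR: {nvr}")
-- ===== Notes on version B (the rewrite author's own statement) =====
-- stated objective: idiomatic
-- what changed: Replaces split-into-parts / scan-parts / join-back with a single left-to-right character scan that finds the first digit starting a dash-separated component and slices the original string there, so no part list is built and no join is performed.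
import Mathlib
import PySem

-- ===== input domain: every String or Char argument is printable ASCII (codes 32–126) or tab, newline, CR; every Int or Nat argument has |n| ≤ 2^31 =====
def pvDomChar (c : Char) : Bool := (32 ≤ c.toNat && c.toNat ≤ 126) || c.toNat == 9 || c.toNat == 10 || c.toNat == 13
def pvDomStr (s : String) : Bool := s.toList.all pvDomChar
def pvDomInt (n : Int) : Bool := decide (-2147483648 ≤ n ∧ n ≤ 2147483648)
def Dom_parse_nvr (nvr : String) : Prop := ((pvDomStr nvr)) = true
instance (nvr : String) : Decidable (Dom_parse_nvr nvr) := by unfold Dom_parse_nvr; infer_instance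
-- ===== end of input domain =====

-- B replaces A's split/scan-parts/join with one character scan over the original
-- string and two slices (objective: idiomatic; same O(n) cost).

-- ===== PORT A =====
-- A's loop over enumerate(parts): index of the first part that is nonempty and starts with a digit
def pvFindVer : List (List Char) → Option Nat
  | [] => none
  | p :: ps =>
    match p with
    | [] => (pvFindVer ps).map (· + 1)
    | c :: _ => if PySem.Chars.isdigit c then some 0 else (pvFindVer ps).map (· + 1)

def parse_nvr (nvr : String) : String × String :=
  let parts := PySem.Chars.splitOn nvr.toList ['-']
  if parts.length < 2 then ("", "")        -- raise ValueError(f"Invalid NVR format: {nvr}") — excluded by Pre_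
  else
    match pvFindVer parts with
    | none => ("", "")                     -- raise ValueError(f"Could not find version in NVR: {nvr}") — excluded by Pre_
    | some k =>
      (String.ofList (PySem.Chars.join ['-'] (parts.take k)),
       String.ofList (PySem.Chars.join ['-'] (parts.drop k)))

-- ===== PORT B =====
-- B's `for i, ch in enumerate(nvr)` loop; prev carries nvr[i-1]
def pvScanB : Option Char → Nat → List Char → Option Nat
  | _, _, [] => none
  | prev, i, c :: rest =>
    if PySem.Chars.isdigit c && (i == 0 || prev == some '-') then some i
    else pvScanB (some c) (i + 1) rest

def parse_nvr_alt (nvr : String) : String × String :=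
  let cs := nvr.toList
  if PySem.Chars.isIn ['-'] cs = false then ("", "")   -- raise ValueError(f"Invalid NVR format: {nvr}") — excluded by Pre_
  else
    match pvScanB none 0 cs with
    | some i =>
      ((if i = 0 then "" else String.ofList (PySem.Chars.slice cs none (some ((i : Int) - 1)))),
       String.ofList (PySem.Chars.slice cs (some (i : Int)) none))
    | none => ("", "")                                  -- raise ValueError(f"Could not find version in NVR: {nvr}") — excluded by Pre_

-- ===== PRECONDITION & SPEC =====
-- Pre_ excludes exactly the inputs where Python A raises ValueError: strings
-- containing no dash at all, and strings in which no dash-separated component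
-- starts with a digit.
def Pre_parse_nvr (nvr : String) : Prop :=
  '-' ∈ nvr.toList ∧
  ∃ i < nvr.toList.length,
    PySem.Chars.isdigit (nvr.toList.getD i ' ') = true ∧
    (i = 0 ∨ nvr.toList.getD (i - 1) ' ' = '-')
instance (nvr : String) : Decidable (Pre_parse_nvr nvr) := by unfold Pre_parse_nvr; infer_instance

def pvWitness_parse_nvr : String := "tpm2-tss-4.0.1-7.el10"

def Spec_parse_nvr (nvr : String) (out : String × String) : Prop := out = parse_nvr_alt nvr
instance (nvr : String) (out : String × String) : Decidable (Spec_parse_nvr nvr out) := by unfold Spec_parse_nvr; infer_instance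

-- ===== CLAIM (what is proved, stated in full; the proofs are below) =====
def Claim_equal_parse_nvr : Prop := ∀ (nvr : String), Dom_parse_nvr nvr → Pre_parse_nvr nvr → Spec_parse_nvr nvr (parse_nvr nvr)

-- ===== LEMMAS AND PROOFS =====

-- Abbreviation used only in the proofs: Python's split("-") as Mathlib's splitOnP
def pvParts (cs : List Char) : List (List Char) := List.splitOnP (fun c => c == '-') cs

theorem pvParts_ne_nil (cs : List Char) : pvParts cs ≠ [] := by
  unfold pvParts
  induction cs with
  | nil => simp [List.splitOnP_nil]
  | cons c r ih =>
    rw [List.splitOnP_cons]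
    split
    · simp
    · obtain ⟨h, t, he⟩ := List.exists_cons_of_ne_nil ih
      simp [he]

theorem pvParts_cons_dash (r : List Char) : pvParts ('-' :: r) = [] :: pvParts r := by
  unfold pvParts; rw [List.splitOnP_cons]; simp

theorem pvParts_cons_ne {c : Char} (hc : c ≠ '-') (r : List Char) :
    pvParts (c :: r) = (pvParts r).modifyHead (c :: ·) := by
  unfold pvParts; rw [List.splitOnP_cons]; simp [hc]

theorem pvGo_spec (fuel : Nat) : ∀ (l cur : List Char) (accs : List (List Char)),
    l.length < fuel →
    PySem.Chars.splitOn.go ['-'] fuel l cur accs =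
      accs.reverse ++ (pvParts l).modifyHead (cur.reverse ++ ·) := by
  induction fuel with
  | zero => intro l cur accs h; omega
  | succ f ih =>
    intro l cur accs h
    cases l with
    | nil =>
      simp [PySem.Chars.splitOn.go, pvParts, List.splitOnP_nil]
    | cons c rest =>
      obtain ⟨h0, t0, he⟩ := List.exists_cons_of_ne_nil (pvParts_ne_nil rest)
      by_cases hc : c = '-'
      · subst hc
        rw [show PySem.Chars.splitOn.go ['-'] (f+1) ('-' :: rest) cur accs
              = PySem.Chars.splitOn.go ['-'] f rest [] (cur.reverse :: accs) by
            simp [PySem.Chars.splitOn.go, List.isPrefixOf]]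
        rw [ih rest [] (cur.reverse :: accs) (by simpa using Nat.lt_of_succ_lt_succ h)]
        rw [pvParts_cons_dash, he]
        simp [List.modifyHead]
      · rw [show PySem.Chars.splitOn.go ['-'] (f+1) (c :: rest) cur accs
              = PySem.Chars.splitOn.go ['-'] f rest (c :: cur) accs by
            simp [PySem.Chars.splitOn.go, List.isPrefixOf, Ne.symm hc]]
        rw [ih rest (c :: cur) accs (by simpa using Nat.lt_of_succ_lt_succ h)]
        rw [pvParts_cons_ne hc, he]
        simp [List.modifyHead]

theorem pvSplitOn_eq (cs : List Char) : PySem.Chars.splitOn cs ['-'] = pvParts cs := by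
  rw [show PySem.Chars.splitOn cs ['-'] = PySem.Chars.splitOn.go ['-'] (cs.length + 1) cs [] [] from rfl]
  rw [pvGo_spec (cs.length + 1) cs [] [] (by omega)]
  obtain ⟨h0, t0, he⟩ := List.exists_cons_of_ne_nil (pvParts_ne_nil cs)
  simp [he]

theorem pvParts_no_dash {p : List Char} (hp : '-' ∉ p) : pvParts p = [p] := by
  unfold pvParts
  induction p with
  | nil => simp [List.splitOnP_nil]
  | cons c r ih =>
    have hc : c ≠ '-' := fun h => hp (h ▸ List.mem_cons_self)
    have hr : '-' ∉ r := fun h => hp (List.mem_cons_of_mem _ h)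
    rw [List.splitOnP_cons]
    simp [hc, ih hr]

theorem pvParts_append {p : List Char} (hp : '-' ∉ p) (t : List Char) :
    pvParts (p ++ '-' :: t) = p :: pvParts t := by
  unfold pvParts
  induction p with
  | nil => simp [List.splitOnP_cons]
  | cons c r ih =>
    have hc : c ≠ '-' := fun h => hp (h ▸ List.mem_cons_self)
    have hr : '-' ∉ r := fun h => hp (List.mem_cons_of_mem _ h)
    rw [List.cons_append, List.splitOnP_cons]
    simp [hc, ih hr]

theorem pvFirstDash {cs : List Char} (h : '-' ∈ cs) :
    ∃ p t, cs = p ++ '-' :: t ∧ '-' ∉ p := by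
  induction cs with
  | nil => simp at h
  | cons c r ih =>
    by_cases hc : c = '-'
    · exact ⟨[], r, by simp [hc], by simp⟩
    · have hr : '-' ∈ r := by
        rcases List.mem_cons.mp h with h1 | h1
        · exact absurd h1.symm hc
        · exact h1
      obtain ⟨p, t, he, hp⟩ := ih hr
      exact ⟨c :: p, t, by simp [he], by simp [Ne.symm hc, hp]⟩

theorem pvParts_two_le {cs : List Char} (h : '-' ∈ cs) : 2 ≤ (pvParts cs).length := by
  obtain ⟨p, t, rfl, hp⟩ := pvFirstDash h
  rw [pvParts_append hp]
  have := pvParts_ne_nil t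
  cases he : pvParts t with
  | nil => exact absurd he this
  | cons a b => simp

theorem pvJoin_cons (a : List Char) (l : List (List Char)) (hl : l ≠ []) :
    PySem.Chars.join ['-'] (a :: l) = a ++ '-' :: PySem.Chars.join ['-'] l := by
  obtain ⟨b, r, rfl⟩ := List.exists_cons_of_ne_nil hl
  rw [PySem.Chars.join_cons_cons]
  simp

theorem pvJoin_parts (t : List Char) : PySem.Chars.join ['-'] (pvParts t) = t := by
  induction t with
  | nil => simp [pvParts, List.splitOnP_nil, PySem.Chars.join_singleton]
  | cons c r ih =>
    obtain ⟨h0, t0, he⟩ := List.exists_cons_of_ne_nil (pvParts_ne_nil r)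
    by_cases hc : c = '-'
    · subst hc
      rw [pvParts_cons_dash, pvJoin_cons [] _ (pvParts_ne_nil r), ih]
      simp
    · rw [pvParts_cons_ne hc, he]
      simp only [List.modifyHead]
      cases t0 with
      | nil =>
        rw [PySem.Chars.join_singleton]
        have := ih
        rw [he, PySem.Chars.join_singleton] at this
        simp [this]
      | cons u v =>
        rw [pvJoin_cons _ _ (by simp)]
        have := ih
        rw [he, pvJoin_cons _ _ (by simp)] at this
        simp [this]

theorem pvScanB_shift (r : List Char) : ∀ (pr : Option Char) (j k : Nat), 0 < k →
    pvScanB pr (j + k) r = (pvScanB pr k r).map (· + j) := by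
  induction r with
  | nil => intro pr j k hk; simp [pvScanB]
  | cons c rest ih =>
    intro pr j k hk
    simp only [pvScanB]
    have h1 : (j + k == 0) = false := by simp; omega
    have h2 : (k == 0) = false := by simp; omega
    rw [h1, h2]
    by_cases hd : (PySem.Chars.isdigit c && (false || pr == some '-')) = true
    · rw [if_pos hd, if_pos hd]; simp [Nat.add_comm]
    · rw [if_neg hd, if_neg hd]
      have := ih (some c) j (k + 1) (by omega)
      rw [show j + k + 1 = j + (k + 1) by omega, this]

theorem pvScanB_dash (t : List Char) (j : Nat) :
    pvScanB (some '-') j t = (pvScanB none 0 t).map (· + j) := by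
  cases t with
  | nil => simp [pvScanB]
  | cons c r =>
    simp only [pvScanB]
    by_cases hd : PySem.Chars.isdigit c = true
    · simp [hd]
    · have hd' : PySem.Chars.isdigit c = false := by simp at hd; exact hd
      rw [if_neg (by rw [hd']; simp), if_neg (by rw [hd']; simp)]
      have h1 : pvScanB (some c) (j + 1) r = (pvScanB (some c) 1 r).map (· + j) :=
        pvScanB_shift r (some c) j 1 (by omega)
      simp [h1]

theorem pvScanB_none {cs : List Char} (h : '-' ∉ cs) :
    ∀ (pr : Option Char) (i : Nat), pr ≠ some '-' → 0 < i → pvScanB pr i cs = none := by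
  induction cs with
  | nil => intro pr i _ _; simp [pvScanB]
  | cons c r ih =>
    intro pr i hpr hi
    have hc : c ≠ '-' := fun hh => h (hh ▸ List.mem_cons_self)
    have hr : '-' ∉ r := fun hh => h (List.mem_cons_of_mem _ hh)
    simp only [pvScanB]
    have h1 : (i == 0) = false := by simp; omega
    have h2 : (pr == some '-') = false := by
      cases pr with
      | none => rfl
      | some a => simp; intro hh; exact hpr (by rw [hh])
    rw [if_neg (by rw [h1, h2]; simp)]
    exact ih hr (some c) (i + 1) (by simp [hc]) (by omega)

theorem pvScanB_pass {p : List Char} (hp : '-' ∉ p) (t : List Char) :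
    ∀ (pr : Option Char) (i : Nat), pr ≠ some '-' → 0 < i →
    pvScanB pr i (p ++ '-' :: t) = (pvScanB none 0 t).map (· + (i + p.length + 1)) := by
  induction p with
  | nil =>
    intro pr i hpr hi
    simp only [List.nil_append, pvScanB]
    have h2 : (pr == some '-') = false := by
      cases pr with
      | none => rfl
      | some a => simp; intro hh; exact hpr (by rw [hh])
    rw [if_neg (by rw [show PySem.Chars.isdigit '-' = false from rfl]; simp)]
    rw [pvScanB_dash t (i + 1)]
    simp only [List.length_nil]
  | cons c p' ih =>
    intro pr i hpr hi
    have hc : c ≠ '-' := fun hh => hp (hh ▸ List.mem_cons_self)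
    have hp' : '-' ∉ p' := fun hh => hp (List.mem_cons_of_mem _ hh)
    rw [List.cons_append]
    simp only [pvScanB]
    have h1 : (i == 0) = false := by simp; omega
    have h2 : (pr == some '-') = false := by
      cases pr with
      | none => rfl
      | some a => simp; intro hh; exact hpr (by rw [hh])
    rw [if_neg (by rw [h1, h2]; simp)]
    rw [ih hp' (some c) (i + 1) (by simp [hc]) (by omega)]
    simp only [List.length_cons]
    simp only [show i + 1 + p'.length + 1 = i + (p'.length + 1) + 1 from by omega]

-- scanning from the very start across a failed dash-free first component
theorem pvScanB_top {p : List Char} (hp : '-' ∉ p) (t : List Char)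
    (hfail : p = [] ∨ ∃ c p', p = c :: p' ∧ PySem.Chars.isdigit c = false) :
    pvScanB none 0 (p ++ '-' :: t) = (pvScanB none 0 t).map (· + (p.length + 1)) := by
  rcases hfail with rfl | ⟨c, p', rfl, hd⟩
  · simp only [List.nil_append, pvScanB]
    rw [if_neg (by rw [show PySem.Chars.isdigit '-' = false from rfl]; simp)]
    rw [pvScanB_dash t 1]
    simp only [List.length_nil]
  · have hc : c ≠ '-' := fun hh => hp (hh ▸ List.mem_cons_self)
    have hp' : '-' ∉ p' := fun hh => hp (List.mem_cons_of_mem _ hh)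
    rw [List.cons_append]
    simp only [pvScanB]
    rw [if_neg (by rw [hd]; simp)]
    rw [pvScanB_pass hp' t (some c) 1 (by simp [hc]) (by omega)]
    simp only [List.length_cons]
    simp only [show 1 + p'.length + 1 = p'.length + 1 + 1 from by omega]

theorem pvScanB_cons_digit {c : Char} (hdig : PySem.Chars.isdigit c = true) (r : List Char) :
    pvScanB none 0 (c :: r) = some 0 := by
  simp only [pvScanB]
  rw [if_pos (by rw [hdig]; simp)]

-- MAIN correspondence between A's part index and B's character position
theorem pvMain : ∀ (n : Nat) (cs : List Char), cs.length ≤ n →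
    match pvFindVer (pvParts cs) with
    | none => pvScanB none 0 cs = none
    | some k =>
      if k = 0 then pvScanB none 0 cs = some 0
      else pvScanB none 0 cs = some ((PySem.Chars.join ['-'] ((pvParts cs).take k)).length + 1) ∧
           cs = PySem.Chars.join ['-'] ((pvParts cs).take k) ++ '-' :: PySem.Chars.join ['-'] ((pvParts cs).drop k) := by
  intro n
  induction n with
  | zero =>
    intro cs h
    have : cs = [] := List.eq_nil_of_length_eq_zero (by omega)
    subst this
    simp [pvParts, List.splitOnP_nil, pvFindVer, pvScanB]
  | succ n ih =>
    intro cs hlen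
    by_cases hd : '-' ∈ cs
    · obtain ⟨p, t, rfl, hp⟩ := pvFirstDash hd
      have hparts : pvParts (p ++ '-' :: t) = p :: pvParts t := pvParts_append hp t
      have hlt : t.length ≤ n := by
        have := hlen; simp [List.length_append] at this; omega
      have iht := ih t hlt
      have hstep : ∀ (hfail : p = [] ∨ ∃ c p', p = c :: p' ∧ PySem.Chars.isdigit c = false),
          match (pvFindVer (pvParts t)).map (· + 1) with
          | none => pvScanB none 0 (p ++ '-' :: t) = none
          | some k =>
            if k = 0 then pvScanB none 0 (p ++ '-' :: t) = some 0
            else pvScanB none 0 (p ++ '-' :: t) = some ((PySem.Chars.join ['-'] ((p :: pvParts t).take k)).length + 1) ∧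
                 p ++ '-' :: t = PySem.Chars.join ['-'] ((p :: pvParts t).take k) ++ '-' :: PySem.Chars.join ['-'] ((p :: pvParts t).drop k) := by
        intro hfail
        have htop := pvScanB_top hp t hfail
        rcases hfv : pvFindVer (pvParts t) with _ | k'
        · rw [hfv] at iht
          simp only at iht ⊢
          rw [htop, iht]
          rfl
        · rw [hfv] at iht
          simp only [Option.map_some]
          rcases k' with _ | k''
          · simp only at iht
            simp only [if_neg (Nat.one_ne_zero)]
            constructor
            · rw [htop, iht]
              simp [PySem.Chars.join_singleton]
            · simp only [List.take_succ_cons, List.take_zero, List.drop_succ_cons, List.drop_zero]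
              rw [PySem.Chars.join_singleton, pvJoin_parts]
          · simp only [if_neg (Nat.succ_ne_zero k'')] at iht
            obtain ⟨ihs, ihe⟩ := iht
            simp only [if_neg (Nat.succ_ne_zero (k'' + 1))]
            have htk : (pvParts t).take (k'' + 1) ≠ [] := by
              have := pvParts_ne_nil t
              cases he : pvParts t with
              | nil => exact absurd he this
              | cons a b => simp
            constructor
            · rw [htop, ihs]
              simp only [Option.map_some, List.take_succ_cons]
              rw [pvJoin_cons _ _ htk]
              simp only [List.length_append, List.length_cons]
              congr 1
              omega
            · simp only [List.take_succ_cons, List.drop_succ_cons]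
              rw [pvJoin_cons _ _ htk]
              conv_lhs => rw [ihe]
              simp
      cases p with
      | nil =>
        rw [hparts]
        simp only [pvFindVer]
        exact hstep (Or.inl rfl)
      | cons c p' =>
        rw [hparts]
        simp only [pvFindVer]
        by_cases hdig : PySem.Chars.isdigit c = true
        · rw [if_pos hdig]
          exact pvScanB_cons_digit hdig _
        · have hdig' : PySem.Chars.isdigit c = false := by simp at hdig; exact hdig
          rw [if_neg hdig]
          exact hstep (Or.inr ⟨c, p', rfl, hdig'⟩)
    · -- no dash
      rw [pvParts_no_dash hd]
      cases cs with
      | nil => simp [pvFindVer, pvScanB]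
      | cons c r =>
        have hc : c ≠ '-' := fun hh => hd (hh ▸ List.mem_cons_self)
        have hr : '-' ∉ r := fun hh => hd (List.mem_cons_of_mem _ hh)
        simp only [pvFindVer]
        by_cases hdig : PySem.Chars.isdigit c = true
        · rw [if_pos hdig]
          exact pvScanB_cons_digit hdig _
        · have hdig' : PySem.Chars.isdigit c = false := by simp at hdig; exact hdig
          rw [if_neg hdig]
          simp only [Option.map_none]
          simp only [pvScanB]
          rw [if_neg (by rw [hdig']; simp)]
          exact pvScanB_none hr (some c) 1 (by simp [hc]) (by omega)

-- ===== VERDICT (by name: the statement is the Claim_ definition above) =====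
theorem parse_nvr_spec : Claim_equal_parse_nvr := by
  intro nvr _ hPre
  simp only [Spec_parse_nvr, parse_nvr, parse_nvr_alt]
  have hd : '-' ∈ nvr.toList := hPre.1
  rw [pvSplitOn_eq]
  have h2 := pvParts_two_le hd
  rw [if_neg (by omega)]
  have hin : PySem.Chars.isIn ['-'] nvr.toList = true := by
    rw [PySem.Chars.isIn_iff_infix]
    obtain ⟨p, t, he, _⟩ := pvFirstDash hd
    exact ⟨p, t, by simp [he]⟩
  rw [if_neg (by simp [hin])]
  have hm := pvMain nvr.toList.length nvr.toList (le_refl _)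
  rcases hfv : pvFindVer (pvParts nvr.toList) with _ | k
  · rw [hfv] at hm
    simp only at hm
    rw [hm]
  · rw [hfv] at hm
    rcases k with _ | k'
    · simp only at hm
      rw [if_pos trivial] at hm
      rw [hm]
      simp only [List.take_zero, List.drop_zero, PySem.Chars.join_nil,
        PySem.Chars.slice_eq_listSlice, pvJoin_parts]
      rw [PySem.List.slice_from_natCast]
      simp
    · simp only at hm
      rw [if_neg (by omega : ¬ (k' + 1 = 0))] at hm
      obtain ⟨hms, hme⟩ := hm
      simp only
      set N := PySem.Chars.join ['-'] ((pvParts nvr.toList).take (k' + 1)) with hN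
      set M := PySem.Chars.join ['-'] ((pvParts nvr.toList).drop (k' + 1)) with hM
      rw [hms]
      simp only [if_neg (Nat.succ_ne_zero _), PySem.Chars.slice_eq_listSlice]
      have hcast : (((N.length + 1 : Nat) : Int) - 1) = ((N.length : Nat) : Int) := by
        push_cast; ring
      rw [hcast, PySem.List.slice_to_natCast, PySem.List.slice_from_natCast]
      simp only [Prod.mk.injEq]
      refine ⟨?_, ?_⟩
      · rw [hme, List.take_left]
      · rw [hme, show N ++ '-' :: M = (N ++ ['-']) ++ M from by simp, List.drop_left' (by simp)]
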